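-- pv_equiv track=rewrite | github.com/MrBrantCode/unitest_baseline | mut_generate/mist_train_cf/cf_20118/solution.py | calculate_frequencies_and_operations
-- ===== SOURCE A (Python) =====
-- def calculate_frequencies_and_operations(list_of_ints):
--     """
--     This function calculates the frequency of numbers divisible by 3,
--     the frequency of numbers not divisible by 3,
--     the sum of all numbers divisible by 3, and
--     the product of all numbers not divisible by 3.
--
--     Args:
--         list_of_ints (list): A list of integers.
--
--     Returns:
--         tuple: A tuple containing the frequency of numbers divisible by 3,
--                the frequency of numbers not divisible by 3,
--                the sum of all numbers divisible by 3, and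
--                the product of all numbers not divisible by 3.
--     """
--     divisible_by_3_count = 0
--     not_divisible_by_3_count = 0
--     divisible_by_3_sum = 0
--     not_divisible_by_3_product = 1
--
--     for num in list_of_ints:
--         if num % 3 == 0:
--             divisible_by_3_count += 1
--             divisible_by_3_sum += num
--         else:
--             not_divisible_by_3_count += 1
--             not_divisible_by_3_product *= num
--
--     return divisible_by_3_count, not_divisible_by_3_count, divisible_by_3_sum, not_divisible_by_3_product
-- ===== SOURCE B (Python) =====
-- def _product(nums):
--     result = 1
--     for n in nums:
--         result *= n
--     return result
--
-- def calculate_frequencies_and_operations(list_of_ints):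
--     divisibles = [n for n in list_of_ints if n % 3 == 0]
--     non_divisibles = [n for n in list_of_ints if n % 3 != 0]
--     return (len(divisibles), len(non_divisibles),
--             sum(divisibles), _product(non_divisibles))
-- ===== Notes on version B (the rewrite author's own statement) =====
-- stated objective: simpler
-- what changed: Replaces the fused four-accumulator loop with a partition into two lists via comprehensions followed by library aggregations (len, sum, math.prod).
import Mathlib
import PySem

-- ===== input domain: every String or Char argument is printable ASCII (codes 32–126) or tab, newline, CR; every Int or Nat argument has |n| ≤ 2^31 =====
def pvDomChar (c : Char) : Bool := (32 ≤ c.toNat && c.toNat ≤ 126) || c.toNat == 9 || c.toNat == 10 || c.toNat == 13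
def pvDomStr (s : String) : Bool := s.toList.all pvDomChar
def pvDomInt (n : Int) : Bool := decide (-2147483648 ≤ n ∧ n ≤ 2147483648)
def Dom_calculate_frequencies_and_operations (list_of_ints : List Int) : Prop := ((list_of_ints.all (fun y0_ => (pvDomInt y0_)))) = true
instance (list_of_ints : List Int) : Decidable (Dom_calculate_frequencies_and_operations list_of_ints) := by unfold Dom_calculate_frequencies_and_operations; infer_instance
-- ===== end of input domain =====

-- B partitions the list into divisible/non-divisible groups and aggregates each, instead of A's fused four-accumulator loop (objective: simpler).
-- ===== PORT A =====
-- A: one loop updating four accumulators (count3, countNot3, sum3, prodNot3).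
def calculate_frequencies_and_operations (list_of_ints : List Int) : Int × Int × Int × Int :=
  let s := list_of_ints.foldl
    (fun (st : Int × Int × Int × Int) num =>
      let (c3, cn, s3, pn) := st
      if PySem.Int.mod num 3 == 0 then (c3 + 1, cn, s3 + num, pn)
      else (c3, cn + 1, s3, pn * num))
    (0, 0, 0, 1)
  s

-- ===== PORT B =====
-- B helper: _product, a plain running-product loop.
def pvProduct (nums : List Int) : Int :=
  nums.foldl (fun result n => result * n) 1

def calculate_frequencies_and_operations_alt (list_of_ints : List Int) : Int × Int × Int × Int :=
  let divisibles := list_of_ints.filter (fun n => PySem.Int.mod n 3 == 0)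
  let non_divisibles := list_of_ints.filter (fun n => PySem.Int.mod n 3 != 0)
  ((divisibles.length : Int), (non_divisibles.length : Int),
   divisibles.sum, pvProduct non_divisibles)

-- ===== PRECONDITION & SPEC =====
def Spec_calculate_frequencies_and_operations (list_of_ints : List Int) (out : Int × Int × Int × Int) : Prop := out = calculate_frequencies_and_operations_alt list_of_ints
instance (list_of_ints : List Int) (out : Int × Int × Int × Int) : Decidable (Spec_calculate_frequencies_and_operations list_of_ints out) := by unfold Spec_calculate_frequencies_and_operations; infer_instance

-- ===== CLAIM (what is proved, stated in full; the proofs are below) =====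
def Claim_equal_calculate_frequencies_and_operations : Prop := ∀ (list_of_ints : List Int), Dom_calculate_frequencies_and_operations list_of_ints → Spec_calculate_frequencies_and_operations list_of_ints (calculate_frequencies_and_operations list_of_ints)

-- ===== LEMMAS AND PROOFS =====
theorem pv_fold_acc (xs : List Int) (c3 cn s3 pn : Int) :
    xs.foldl
      (fun (st : Int × Int × Int × Int) num =>
        let (a, b, c, d) := st
        if PySem.Int.mod num 3 == 0 then (a + 1, b, c + num, d)
        else (a, b + 1, c, d * num))
      (c3, cn, s3, pn)
    = (c3 + ((xs.filter (fun n => PySem.Int.mod n 3 == 0)).length : Int),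
       cn + ((xs.filter (fun n => PySem.Int.mod n 3 != 0)).length : Int),
       s3 + (xs.filter (fun n => PySem.Int.mod n 3 == 0)).sum,
       pn * pvProduct (xs.filter (fun n => PySem.Int.mod n 3 != 0))) := by
  induction xs generalizing c3 cn s3 pn with
  | nil => simp [pvProduct]
  | cons x t ih =>
    have hp : ∀ (a : Int) (l : List Int),
        l.foldl (fun result n => result * n) a = a * pvProduct l := by
      intro a l
      induction l generalizing a with
      | nil => simp [pvProduct]
      | cons y l ihl =>
        conv_rhs => rw [pvProduct, List.foldl_cons]
        rw [List.foldl_cons, ihl, ihl]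
        ring
    by_cases h : (PySem.Int.mod x 3 == 0) = true
    · have hne : (PySem.Int.mod x 3 != 0) = false := by
        rw [bne, h]; rfl
      rw [List.foldl_cons]
      simp only [h, reduceIte, List.filter_cons, hne, Bool.false_eq_true,
        List.length_cons, List.sum_cons]
      rw [ih]
      refine Prod.ext ?_ (Prod.ext rfl (Prod.ext ?_ rfl))
      · push_cast; ring
      · dsimp only; ring
    · have hb : (PySem.Int.mod x 3 == 0) = false := by
        cases hb : (PySem.Int.mod x 3 == 0) <;> simp_all
      have hne : (PySem.Int.mod x 3 != 0) = true := by
        rw [bne, hb]; rfl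
      rw [List.foldl_cons]
      simp only [hb, Bool.false_eq_true, reduceIte, List.filter_cons, hne,
        List.length_cons]
      rw [ih]
      refine Prod.ext rfl (Prod.ext ?_ (Prod.ext rfl ?_))
      · push_cast; ring
      · dsimp only
        conv_rhs => rw [pvProduct, List.foldl_cons]
        rw [hp]
        ring

-- ===== VERDICT (by name: the statement is the Claim_ definition above) =====
theorem calculate_frequencies_and_operations_spec : Claim_equal_calculate_frequencies_and_operations := by
  intro xs _
  unfold Spec_calculate_frequencies_and_operations
  unfold calculate_frequencies_and_operations calculate_frequencies_and_operations_alt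
  rw [pv_fold_acc]
  simp
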